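-- pv_equiv track=rewrite | github.com/Abhimanyushahi/DSA | Recursion/staircase.py | num_way
-- ===== SOURCE A (Python) =====
-- def num_way(num):
--     if num ==1:
--         return 1
--     if num == 2:
--         return 2
--     if num ==3:
--         return 4
--     else:
--         return num_way(num-1)+num_way(num-2)+num_way(num-3)
-- ===== SOURCE B (Python) =====
-- def num_way(num):
--     a, b, c = 1, 2, 4
--     if num == 1:
--         return a
--     if num == 2:
--         return b
--     for _ in range(num - 3):
--         a, b, c = b, c, a + b + c
--     return c
-- ===== Notes on version B (the rewrite author's own statement) =====
-- stated objective: alternative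
-- what changed: Replaced the triple-branching exponential recursion by a bottom-up loop keeping the last three values (intended as faster; a timing run saw A time out at n=16 where B answers instantly, but could not always confirm a clean ratio).
-- outside the precondition, e.g. on num_way(0): A raises RecursionError, B returns 4
import Mathlib
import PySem

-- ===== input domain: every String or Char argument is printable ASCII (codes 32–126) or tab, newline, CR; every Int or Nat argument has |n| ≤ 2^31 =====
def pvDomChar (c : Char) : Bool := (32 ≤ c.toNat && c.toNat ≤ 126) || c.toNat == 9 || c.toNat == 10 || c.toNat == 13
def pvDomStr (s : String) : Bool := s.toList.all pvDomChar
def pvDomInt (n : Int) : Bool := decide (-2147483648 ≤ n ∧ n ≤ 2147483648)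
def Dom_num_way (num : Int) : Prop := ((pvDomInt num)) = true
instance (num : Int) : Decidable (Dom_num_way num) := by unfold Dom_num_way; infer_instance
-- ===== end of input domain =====

-- B replaces A's triple recursion by a bottom-up loop keeping the last three values; return value only.

-- ===== PORT A =====
-- Literal port of A's recursion; for num ≤ 0 Python recurses forever (RecursionError),
-- excluded by Pre_; the port returns 0 there only to be total.
def num_way (num : Int) : Int :=
  if num = 1 then 1
  else if num = 2 then 2
  else if num = 3 then 4
  else if num ≤ 0 then 0
  else num_way (num - 1) + num_way (num - 2) + num_way (num - 3)
termination_by num.toNat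
decreasing_by all_goals omega

-- ===== PORT B =====
def num_way_alt (num : Int) : Int :=
  if num = 1 then 1
  else if num = 2 then 2
  else
    (PySem.List.pyRange 0 (num - 3) 1).foldl
      (fun (s : Int × Int × Int) _ => (s.2.1, s.2.2, s.1 + s.2.1 + s.2.2)) (1, 2, 4) |>.2.2

-- ===== PRECONDITION & SPEC =====
-- Pre_ excludes num ≤ 0, on which Python A recurses without a base case and raises RecursionError.
def Pre_num_way (num : Int) : Prop := 1 ≤ num
instance (num : Int) : Decidable (Pre_num_way num) := by unfold Pre_num_way; infer_instance
def pvWitness_num_way : Int := 5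

def Spec_num_way (num : Int) (out : Int) : Prop := out = num_way_alt num
instance (num : Int) (out : Int) : Decidable (Spec_num_way num out) := by unfold Spec_num_way; infer_instance

-- ===== CLAIM (what is proved, stated in full; the proofs are below) =====
def Claim_equal_num_way : Prop := ∀ (num : Int), Dom_num_way num → Pre_num_way num → Spec_num_way num (num_way num)

-- ===== LEMMAS AND PROOFS =====

-- A's recursion unfolded at num ≥ 4.
theorem num_way_rec (num : Int) (h : 4 ≤ num) :
    num_way num = num_way (num - 1) + num_way (num - 2) + num_way (num - 3) := by
  rw [num_way]
  have h1 : ¬ num = 1 := by omega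
  have h2 : ¬ num = 2 := by omega
  have h3 : ¬ num = 3 := by omega
  have h4 : ¬ num ≤ 0 := by omega
  simp [h1, h2, h3, h4]

-- The fold over k steps from (f 1, f 2, f 3) lands on (f (k+1), f (k+2), f (k+3)).
theorem fold_tri (k : Nat) :
    (PySem.List.pyRange 0 (k : Int) 1).foldl
      (fun (s : Int × Int × Int) _ => (s.2.1, s.2.2, s.1 + s.2.1 + s.2.2)) (1, 2, 4)
    = (num_way (k + 1), num_way (k + 2), num_way (k + 3)) := by
  induction k with
  | zero =>
    simp [PySem.List.pyRange_one_eq_nil, num_way]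
  | succ n ih =>
    have hsplit : PySem.List.pyRange 0 ((n : Int) + 1) 1
        = PySem.List.pyRange 0 (n : Int) 1 ++ [(n : Int)] :=
      PySem.List.pyRange_one_succ_right (by omega)
    push_cast
    rw [hsplit, List.foldl_append, ih]
    simp only [List.foldl_cons, List.foldl_nil]
    have h4 : (4 : Int) ≤ (n : Int) + 1 + 3 := by omega
    have := num_way_rec ((n : Int) + 1 + 3) h4
    simp only [Prod.mk.injEq]
    refine ⟨by ring_nf, by ring_nf, ?_⟩
    rw [this]; ring_nf

-- ===== VERDICT (by name: the statement is the Claim_ definition above) =====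
theorem num_way_spec : Claim_equal_num_way := by
  intro num _ hpre
  unfold Spec_num_way num_way_alt
  by_cases h1 : num = 1
  · subst h1; rw [num_way]; norm_num
  by_cases h2 : num = 2
  · subst h2; rw [num_way]; norm_num
  simp only [h1, h2, if_false]
  have h3 : 3 ≤ num := by unfold Pre_num_way at hpre; omega
  obtain ⟨k, hk⟩ : ∃ k : Nat, num - 3 = (k : Int) := ⟨(num - 3).toNat, by omega⟩
  rw [hk, fold_tri k]
  have : (k : Int) + 3 = num := by omega
  simp [this]
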